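-- pv_equiv track=rewrite | github.com/YoC00lig/Algorithms-and-data-structures | Graph algorithms/Coherent components.py | CoherentComponents
-- ===== SOURCE A (Python) =====
-- def CoherentComponents(G):
--     n = len(G)
--     result = []
--     visited = [False] * n
--
--     def DFS(u):
--         visited[u] = True
--         for v, _ in G[u]:
--             if not visited[v]:
--                 DFS(v)
--
--     for u in range(n):
--         if not visited[u]:
--             result.append(u)
--             DFS(u)
--     return result
-- ===== SOURCE B (Python) =====
-- def CoherentComponents(G):
--     n = len(G)
--     result = []
--     visited = [False] * n
--     for u in range(n):
--         if not visited[u]: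
--             result.append(u)
--             stack = [u]
--             while stack:
--                 v = stack.pop()
--                 if not visited[v]:
--                     visited[v] = True
--                     for w, _ in reversed(G[v]):
--                         stack.append(w)
--     return result
-- ===== Notes on version B (the rewrite author's own statement) =====
-- stated objective: alternative
-- what changed: The recursive DFS with a shared mutable visited array is replaced by an iterative DFS driven by an explicit stack (pop, mark-on-pop, push neighbours), removing the recursion entirely.
import Mathlib
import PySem

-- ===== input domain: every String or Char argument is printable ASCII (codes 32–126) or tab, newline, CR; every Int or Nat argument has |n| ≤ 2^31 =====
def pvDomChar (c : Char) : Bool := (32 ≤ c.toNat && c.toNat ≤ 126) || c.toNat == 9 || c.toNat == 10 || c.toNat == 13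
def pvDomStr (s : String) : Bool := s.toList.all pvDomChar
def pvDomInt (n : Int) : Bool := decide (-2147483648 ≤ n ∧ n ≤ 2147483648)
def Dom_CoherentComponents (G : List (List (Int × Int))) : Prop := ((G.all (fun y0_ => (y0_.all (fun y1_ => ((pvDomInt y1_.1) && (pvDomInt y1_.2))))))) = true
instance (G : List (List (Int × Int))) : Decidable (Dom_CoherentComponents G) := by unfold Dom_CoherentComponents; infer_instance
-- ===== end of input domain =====

-- B replaces A's recursive DFS by an explicit-stack iterative DFS (same asymptotic cost, no recursion);
-- the equivalence proved is about the return value (A mutates only its local `visited`).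

-- ===== PORT A =====
-- A's recursive DFS.  The `if not visited[v]` guard that A places at every call site of DFS is fused
-- into goA's first match (A only ever calls DFS on unvisited vertices, so behaviour is identical),
-- and a fuel argument makes the recursion structural: fuel ≥ the number of unvisited entries always
-- suffices, and the ports are only compared through calls with fuel = len(G) ≥ count false visited.
-- `pyGet? = none` (Python IndexError, excluded by Pre_) is totalized as a skip.
mutual
def goA (G : List (List (Int × Int))) (f : Nat) (v : Int) (vis : List Bool) : List Bool :=
  match PySem.List.pyGet? vis v with
  | some false =>
    match f with
    | 0 => vis
    | f' + 1 => nbrsA G f' (PySem.List.pyGetD G v []) (PySem.List.pySetD vis v true)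
  | _ => vis
termination_by (f, 0)

def nbrsA (G : List (List (Int × Int))) (f : Nat) (l : List (Int × Int)) (vis : List Bool) : List Bool :=
  match l with
  | [] => vis
  | (v, _) :: t => nbrsA G f t (goA G f v vis)
termination_by (f, l.length + 1)
end

def CoherentComponents (G : List (List (Int × Int))) : List Int :=
  ((PySem.List.pyRange 0 (G.length : Int) 1).foldl
    (fun (st : List Int × List Bool) u =>
      match PySem.List.pyGet? st.2 u with
      | some false => (st.1 ++ [u], goA G G.length u st.2)
      | _ => st)
    ([], List.replicate G.length false)).1

-- ===== PORT B =====
-- lemma needed by runB's termination measure (marking a vertex read as `false` lowers the false-count)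
theorem count_false_set_lt (vis : List Bool) (k : Nat) (hk : k < vis.length)
    (hf : vis[k] = false) : (vis.set k true).count false < vis.count false := by
  induction vis generalizing k with
  | nil => simp at hk
  | cons h t ih =>
    cases k with
    | zero =>
      simp at hf; subst hf
      simp
    | succ k =>
      simp at hk hf
      have := ih k hk hf
      cases h <;> simp [List.set] <;> omega

theorem cf_pySetD_lt (vis : List Bool) (v : Int)
    (h : PySem.List.pyGet? vis v = some false) :
    (PySem.List.pySetD vis v true).count false < vis.count false := by
  unfold PySem.List.pyGet? at h
  cases hidx : PySem.List.pyIdx? vis.length v with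
  | none => rw [hidx] at h; simp at h
  | some k =>
    rw [hidx] at h
    simp only [Option.bind_some] at h
    have hk : k < vis.length := by
      by_contra hge
      rw [List.getElem?_eq_none (by omega)] at h
      simp at h
    have hv : vis[k] = false := by
      rw [List.getElem?_eq_getElem hk] at h
      exact Option.some.inj h
    have : PySem.List.pySetD vis v true = vis.set k true := by
      simp [PySem.List.pySetD, PySem.List.pySet?, hidx]
    rw [this]
    exact count_false_set_lt vis k hk hv

-- B's explicit-stack DFS: pop a vertex, skip it if already visited, else mark it and push its
-- neighbours (Source B pushes reversed(G[v]), so the pop order is G[v]'s order: head of the Lean list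
-- is the top of the stack).  `pyGet? = none` (IndexError, excluded by Pre_) is totalized as a skip.
def runB (G : List (List (Int × Int))) (stack : List Int) (vis : List Bool) : List Bool :=
  match stack with
  | [] => vis
  | v :: st =>
    match h : PySem.List.pyGet? vis v with
    | some false =>
        runB G ((PySem.List.pyGetD G v []).map Prod.fst ++ st) (PySem.List.pySetD vis v true)
    | _ => runB G st vis
termination_by (vis.count false, stack.length)
decreasing_by
  · exact Prod.Lex.left _ _ (cf_pySetD_lt vis v h)
  · exact Prod.Lex.right _ (Nat.lt_succ_self _)

def CoherentComponents_alt (G : List (List (Int × Int))) : List Int :=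
  ((PySem.List.pyRange 0 (G.length : Int) 1).foldl
    (fun (st : List Int × List Bool) u =>
      match PySem.List.pyGet? st.2 u with
      | some false => (st.1 ++ [u], runB G [u] st.2)
      | _ => st)
    ([], List.replicate G.length false)).1

-- ===== PRECONDITION & SPEC =====
-- Pre_ = exactly the inputs on which the Python A returns: every neighbour index v must satisfy
-- -len(G) ≤ v < len(G) (Python wraps negative indices; outside this range A raises IndexError,
-- and so does B).
def Pre_CoherentComponents (G : List (List (Int × Int))) : Prop :=
  ∀ adj ∈ G, ∀ p ∈ adj, -(G.length : Int) ≤ p.1 ∧ p.1 < (G.length : Int)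
instance (G : List (List (Int × Int))) : Decidable (Pre_CoherentComponents G) := by
  unfold Pre_CoherentComponents; infer_instance

def pvWitness_CoherentComponents : (List (List (Int × Int))) :=
  [[((1 : Int), (7 : Int))], [((-2 : Int), (0 : Int))], []]

def Spec_CoherentComponents (G : List (List (Int × Int))) (out : List Int) : Prop := out = CoherentComponents_alt G
instance (G : List (List (Int × Int))) (out : List Int) : Decidable (Spec_CoherentComponents G out) := by unfold Spec_CoherentComponents; infer_instance

-- ===== CLAIM (what is proved, stated in full; the proofs are below) =====
def Claim_equal_CoherentComponents : Prop := ∀ (G : List (List (Int × Int))), Dom_CoherentComponents G → Pre_CoherentComponents G → Spec_CoherentComponents G (CoherentComponents G)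

-- ===== LEMMAS AND PROOFS =====

-- goA / nbrsA preserve the length of `visited` and never increase its false-count
theorem goA_props (G : List (List (Int × Int))) :
    ∀ f : Nat,
      (∀ (v : Int) (vis : List Bool),
        (goA G f v vis).length = vis.length ∧
        (goA G f v vis).count false ≤ vis.count false) ∧
      (∀ (l : List (Int × Int)) (vis : List Bool),
        (nbrsA G f l vis).length = vis.length ∧
        (nbrsA G f l vis).count false ≤ vis.count false) := by
  intro f
  induction f with
  | zero =>
    constructor
    · intro v vis
      rw [goA]
      cases h : PySem.List.pyGet? vis v with
      | none => simp
      | some b => cases b <;> simp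
    · intro l
      induction l with
      | nil => intro vis; rw [nbrsA]; simp
      | cons p t ih =>
        intro vis
        obtain ⟨v, w⟩ := p
        rw [nbrsA]
        have hg : (goA G 0 v vis).length = vis.length ∧
            (goA G 0 v vis).count false ≤ vis.count false := by
          rw [goA]
          cases h : PySem.List.pyGet? vis v with
          | none => simp
          | some b => cases b <;> simp
        have := ih (goA G 0 v vis)
        exact ⟨this.1.trans hg.1, this.2.trans hg.2⟩
  | succ f ih =>
    have hgo : ∀ (v : Int) (vis : List Bool),
        (goA G (f + 1) v vis).length = vis.length ∧
        (goA G (f + 1) v vis).count false ≤ vis.count false := by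
      intro v vis
      rw [goA]
      cases h : PySem.List.pyGet? vis v with
      | none => simp
      | some b =>
        cases b with
        | true => simp
        | false =>
          simp only []
          have hn := ih.2 (PySem.List.pyGetD G v []) (PySem.List.pySetD vis v true)
          have hlt := cf_pySetD_lt vis v h
          have hlen : (PySem.List.pySetD vis v true).length = vis.length :=
            PySem.List.length_pySetD vis v true
          exact ⟨hn.1.trans hlen, le_trans hn.2 (le_of_lt hlt)⟩
    refine ⟨hgo, ?_⟩
    intro l
    induction l with
    | nil => intro vis; rw [nbrsA]; simp
    | cons p t iht =>
      intro vis
      obtain ⟨v, w⟩ := p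
      rw [nbrsA]
      have h1 := hgo v vis
      have h2 := iht (goA G (f + 1) v vis)
      exact ⟨h2.1.trans h1.1, h2.2.trans h1.2⟩

-- key simulation lemma: running B's stack machine with v on top equals first completing A's DFS
-- from v (with sufficient fuel), for any rest of the stack
theorem run_go (G : List (List (Int × Int))) :
    ∀ f : Nat,
      (∀ (v : Int) (vis : List Bool) (st : List Int), vis.count false ≤ f →
        runB G (v :: st) vis = runB G st (goA G f v vis)) ∧
      (∀ (l : List (Int × Int)) (vis : List Bool) (st : List Int), vis.count false ≤ f →
        runB G (l.map Prod.fst ++ st) vis = runB G st (nbrsA G f l vis)) := by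
  intro f
  induction f with
  | zero =>
    have hgo : ∀ (v : Int) (vis : List Bool) (st : List Int), vis.count false ≤ 0 →
        runB G (v :: st) vis = runB G st (goA G 0 v vis) := by
      intro v vis st hcf
      rw [goA, runB]
      cases h : PySem.List.pyGet? vis v with
      | none => simp
      | some b =>
        cases b with
        | true => simp
        | false =>
          exfalso
          have hm : false ∈ vis := PySem.List.mem_of_pyGet?_eq_some _ h
          have : 0 < vis.count false := List.count_pos_iff.mpr hm
          omega
    refine ⟨hgo, ?_⟩
    intro l
    induction l with
    | nil => intro vis st hcf; rw [nbrsA]; simp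
    | cons p t ih =>
      intro vis st hcf
      obtain ⟨v, w⟩ := p
      rw [nbrsA]
      have hstep := hgo v vis (t.map Prod.fst ++ st) hcf
      simp only [List.map_cons, List.cons_append]
      rw [hstep]
      exact ih (goA G 0 v vis) st (le_trans ((goA_props G 0).1 v vis).2 hcf)
  | succ f ih =>
    have hgo : ∀ (v : Int) (vis : List Bool) (st : List Int), vis.count false ≤ f + 1 →
        runB G (v :: st) vis = runB G st (goA G (f + 1) v vis) := by
      intro v vis st hcf
      rw [goA, runB]
      cases h : PySem.List.pyGet? vis v with
      | none => simp
      | some b =>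
        cases b with
        | true => simp
        | false =>
          simp only []
          have hlt := cf_pySetD_lt vis v h
          exact ih.2 (PySem.List.pyGetD G v []) (PySem.List.pySetD vis v true) st (by omega)
    refine ⟨hgo, ?_⟩
    intro l
    induction l with
    | nil => intro vis st hcf; rw [nbrsA]; simp
    | cons p t iht =>
      intro vis st hcf
      obtain ⟨v, w⟩ := p
      rw [nbrsA]
      have hstep := hgo v vis (t.map Prod.fst ++ st) hcf
      simp only [List.map_cons, List.cons_append]
      rw [hstep]
      exact iht (goA G (f + 1) v vis) st
        (le_trans ((goA_props G (f + 1)).1 v vis).2 hcf)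

theorem runB_singleton (G : List (List (Int × Int))) (u : Int) (vis : List Bool)
    (h : vis.count false ≤ G.length) :
    runB G [u] vis = goA G G.length u vis := by
  rw [(run_go G G.length).1 u vis [] h, runB]

theorem fold_eq (G : List (List (Int × Int))) :
    ∀ (us : List Int) (res : List Int) (vis : List Bool), vis.length = G.length →
      us.foldl
        (fun (st : List Int × List Bool) u =>
          match PySem.List.pyGet? st.2 u with
          | some false => (st.1 ++ [u], goA G G.length u st.2)
          | _ => st) (res, vis)
      = us.foldl
        (fun (st : List Int × List Bool) u =>
          match PySem.List.pyGet? st.2 u with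
          | some false => (st.1 ++ [u], runB G [u] st.2)
          | _ => st) (res, vis) := by
  intro us
  induction us with
  | nil => intro res vis _; rfl
  | cons u t ih =>
    intro res vis hlen
    simp only [List.foldl_cons]
    cases h : PySem.List.pyGet? vis u with
    | none => exact ih res vis hlen
    | some b =>
      cases b with
      | true => exact ih res vis hlen
      | false =>
        rw [runB_singleton G u vis (hlen ▸ List.count_le_length)]
        exact ih (res ++ [u]) (goA G G.length u vis)
          (((goA_props G G.length).1 u vis).1.trans hlen)

theorem ports_eq (G : List (List (Int × Int))) :
    CoherentComponents G = CoherentComponents_alt G := by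
  unfold CoherentComponents CoherentComponents_alt
  rw [fold_eq G (PySem.List.pyRange 0 (G.length : Int) 1) [] (List.replicate G.length false)
    (List.length_replicate)]

-- ===== VERDICT (by name: the statement is the Claim_ definition above) =====
theorem CoherentComponents_spec : Claim_equal_CoherentComponents := by
  intro G _ _
  unfold Spec_CoherentComponents
  exact ports_eq G
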